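-- pv_equiv track=rewrite | github.com/misa5555/py | LinkedList/reverse_node_k_groups.py | differentPlaylists
-- ===== SOURCE A (Python) =====
-- def differentPlaylists(n, k, l):
--   ans = 1
--   for i in range(l):
--     if i > k:
--       ans *= (n - k)
--       ans %= (10 ** 9 + 7)
--     else:
--       ans *= n - i
--       ans %= (10 ** 9 + 7)
--   return ans % (10 ** 9 + 7)
-- ===== SOURCE B (Python) =====
-- def differentPlaylists(n, k, l):
--     MOD = 10 ** 9 + 7
--     m = max(0, min(l, k + 1))
--     ans = 1
--     for i in range(m):
--         ans = ans * (n - i) % MOD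
--     return ans * pow(n - k, max(0, l - m), MOD) % MOD
-- ===== Notes on version B (the rewrite author's own statement) =====
-- stated objective: alternative
-- what changed: Replaces A's uniform O(l) loop with a split closed form: a loop over only the first min(l,k+1) distinct factors followed by a single modular exponentiation pow(n-k, l-m, MOD) for the constant tail (asymptotically fewer multiplications when k << l; a timing run did not confirm a consistent 1.5x speed-up).
import Mathlib
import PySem

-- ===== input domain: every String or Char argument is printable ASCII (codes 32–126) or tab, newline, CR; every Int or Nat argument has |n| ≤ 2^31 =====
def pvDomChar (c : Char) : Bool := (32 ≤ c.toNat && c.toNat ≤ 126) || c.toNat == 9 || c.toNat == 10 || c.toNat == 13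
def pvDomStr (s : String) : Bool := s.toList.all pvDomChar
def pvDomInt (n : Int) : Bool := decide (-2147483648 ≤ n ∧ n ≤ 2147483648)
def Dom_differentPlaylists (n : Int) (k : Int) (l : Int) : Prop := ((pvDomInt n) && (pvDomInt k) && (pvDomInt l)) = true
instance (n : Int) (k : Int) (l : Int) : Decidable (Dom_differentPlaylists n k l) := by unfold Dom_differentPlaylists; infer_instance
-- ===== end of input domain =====

-- B replaces A's per-step loop by the first min(l,k+1) distinct factors plus one modular exponentiation of the constant tail (alternative algorithm; fewer multiplications when k << l).

-- ===== PORT A =====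
def differentPlaylists (n : Int) (k : Int) (l : Int) : Int :=
  let ans := (PySem.List.pyRange 0 l 1).foldl (fun ans i =>
    if i > k then PySem.Int.mod (ans * (n - k)) 1000000007
    else PySem.Int.mod (ans * (n - i)) 1000000007) 1
  PySem.Int.mod ans 1000000007

-- ===== PORT B =====
def differentPlaylists_alt (n : Int) (k : Int) (l : Int) : Int :=
  let m := max 0 (min l (k + 1))
  let ans := (PySem.List.pyRange 0 m 1).foldl
    (fun ans i => PySem.Int.mod (ans * (n - i)) 1000000007) 1
  PySem.Int.mod (ans * PySem.Int.powMod (n - k) (max 0 (l - m)).toNat 1000000007) 1000000007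

-- ===== PRECONDITION & SPEC =====
def Spec_differentPlaylists (n : Int) (k : Int) (l : Int) (out : Int) : Prop := out = differentPlaylists_alt n k l
instance (n : Int) (k : Int) (l : Int) (out : Int) : Decidable (Spec_differentPlaylists n k l out) := by unfold Spec_differentPlaylists; infer_instance

-- ===== CLAIM (what is proved, stated in full; the proofs are below) =====
def Claim_equal_differentPlaylists : Prop := ∀ (n : Int) (k : Int) (l : Int), Dom_differentPlaylists n k l → Spec_differentPlaylists n k l (differentPlaylists n k l)

-- ===== LEMMAS AND PROOFS =====

/-- A multiply-then-mod fold over `List.range L`, reduced mod p, is the plain product mod p. -/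
lemma pvFoldModEq (f : Nat → Int) (p : Int) (L : Nat) :
    ((List.range L).foldl (fun a j => (a * f j) % p) 1) % p
      = (∏ i ∈ Finset.range L, f i) % p := by
  induction L with
  | zero => simp
  | succ L ih =>
    rw [List.range_succ, List.foldl_append, Finset.prod_range_succ]
    simp only [List.foldl_cons, List.foldl_nil]
    rw [Int.emod_emod_of_dvd _ dvd_rfl, Int.mul_emod, ih, ← Int.mul_emod]

/-- The pure-arithmetic core: splitting the product of A's terms at `M`. -/
lemma pvProdSplit (n k : Int) (L M : Nat) (hML : M ≤ L)
    (hle : ∀ i : Nat, i < M → ¬ ((i : Int) > k))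
    (hgt : ∀ i : Nat, M ≤ i → i < L → (i : Int) > k) :
    (∏ i ∈ Finset.range L, (if (i : Int) > k then n - k else n - (i : Int)))
      = (∏ i ∈ Finset.range M, (n - (i : Int))) * (n - k) ^ (L - M) := by
  have hL : L = M + (L - M) := by omega
  rw [hL, Finset.prod_range_add]
  congr 1
  · exact Finset.prod_congr rfl (fun i hi => by
      rw [if_neg (hle i (Finset.mem_range.mp hi))])
  · rw [Finset.prod_congr rfl (fun i hi => by
      rw [if_pos (hgt (M + i) (by omega) (by have := Finset.mem_range.mp hi; omega))]),
      Finset.prod_const, Finset.card_range]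
    congr 1
    omega

lemma pvCombine (x y p : Int) (X : Int) (hx : x % p = X % p) :
    (x * (y % p)) % p = (X * y) % p := by
  rw [Int.mul_emod x (y % p), Int.emod_emod_of_dvd _ dvd_rfl, hx, ← Int.mul_emod]

theorem pvMain (n k l : Int) : differentPlaylists n k l = differentPlaylists_alt n k l := by
  unfold differentPlaylists differentPlaylists_alt
  have hp : (0 : Int) < 1000000007 := by norm_num
  simp only [PySem.Int.mod_eq_emod_of_pos hp, PySem.Int.powMod_eq_emod _ _ hp,
    PySem.List.pyRange_one, List.foldl_map, sub_zero, zero_add]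
  have hf : (fun (a : Int) (j : Nat) =>
      if (j : Int) > k then (a * (n - k)) % 1000000007
      else (a * (n - (j : Int))) % 1000000007)
      = fun (a : Int) (j : Nat) =>
        (a * (if (j : Int) > k then n - k else n - (j : Int))) % 1000000007 := by
    funext a j
    by_cases h : (j : Int) > k <;> simp [h]
  rw [hf, pvFoldModEq (fun j : Nat => if (j : Int) > k then n - k else n - (j : Int)) 1000000007 l.toNat,
    pvCombine _ _ _ _ (pvFoldModEq (fun j : Nat => (n - (j : Int))) 1000000007 (max 0 (min l (k + 1))).toNat),
    pvProdSplit n k l.toNat (max 0 (min l (k + 1))).toNat (by omega)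
      (fun i hi => by omega) (fun i h1 h2 => by omega)]
  congr 3
  omega

-- ===== VERDICT (by name: the statement is the Claim_ definition above) =====
theorem differentPlaylists_spec : Claim_equal_differentPlaylists := by
  intro n k l _
  exact pvMain n k l
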